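-- pv_equiv track=rewrite | github.com/HarryMWinters/coding-katas | hacker-rank/encryption/solution.py | encryption
-- ===== SOURCE A (Python) =====
-- import math
--
-- def encryption(string):
--     """
--     Return and encrypted string.
--
--     Args:
--         param1: An input string of asci characters.
--     Returns:
--        A string of the encrypted input.
--     Raises:
--         (someTypeOf)Error: if things go wrong.
--     """
--     rowLength = math.ceil(math.sqrt(len(string)))
--     matrix = []
--     for i, val in enumerate(string):
--         if i % rowLength == 0:
--             matrix.append([val])
--         else:
--             matrix[-1].append(val)
--
--     encodedWordist = []
--     for i in range(rowLength):
--         word = []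
--         for j in matrix:
--             if i < len(j):
--                 word.append(j[i])
--         encodedWordist.append("".join(word))
--
--     return " ".join(encodedWordist)
-- ===== SOURCE B (Python) =====
-- import math
--
-- def encryption(string):
--     rowLength = math.ceil(math.sqrt(len(string)))
--     return " ".join(string[i::rowLength] for i in range(rowLength))
-- ===== Notes on version B (the rewrite author's own statement) =====
-- stated objective: simpler
-- what changed: Drops the explicit matrix: instead of building a list-of-lists grid character by character and then scanning it column by column, B reads each output word directly from the input as the strided slice string[i::rowLength].
import Mathlib
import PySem

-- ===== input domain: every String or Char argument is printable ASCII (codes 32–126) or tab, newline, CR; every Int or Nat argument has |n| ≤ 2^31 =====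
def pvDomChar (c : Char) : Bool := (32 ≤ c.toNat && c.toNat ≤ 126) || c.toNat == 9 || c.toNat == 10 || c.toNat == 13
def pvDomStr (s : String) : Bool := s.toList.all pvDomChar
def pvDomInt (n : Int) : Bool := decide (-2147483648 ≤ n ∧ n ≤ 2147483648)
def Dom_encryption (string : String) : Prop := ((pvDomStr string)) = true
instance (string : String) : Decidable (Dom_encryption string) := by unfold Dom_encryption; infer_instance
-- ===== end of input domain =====

-- B drops A's explicit matrix: each encrypted word is read directly from the input as the strided slice string[i::rowLength]; objective: simpler.


-- ===== PORT A =====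
-- hand port of math.ceil(math.sqrt(n)) (no PySem float primitive): exact integer ceiling square root,
-- which is what the Python computes for every length the double sqrt represents faithfully (len < 2^26).
def pvCeilSqrt (n : Nat) : Nat := if Nat.sqrt n * Nat.sqrt n = n then Nat.sqrt n else Nat.sqrt n + 1

-- matrix[-1].append(val): replace the last row by row ++ [c] (the [] case is Python's unreachable IndexError)
def pvAppendLast : List (List Char) → Char → List (List Char)
  | [], _ => []
  | [row], c => [row ++ [c]]
  | x :: xs, c => x :: pvAppendLast xs c

def encryption (string : String) : String :=
  let cs := string.toList
  let rowLength : Int := (pvCeilSqrt cs.length : Int)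
  let matrix : List (List Char) := (PySem.List.enumerate cs).foldl
    (fun m p => if PySem.Int.mod p.1 rowLength = 0 then m ++ [[p.2]] else pvAppendLast m p.2) []
  let encodedWordist : List (List Char) := (PySem.List.pyRange 0 rowLength).foldl
    (fun acc i => acc ++ [matrix.foldl
      (fun word j => if i < (j.length : Int) then word ++ [PySem.List.pyGetD j i ' '] else word) []]) []
  String.ofList (PySem.Chars.join [' '] encodedWordist)

-- ===== PORT B =====
def encryption_alt (string : String) : String :=
  let cs := string.toList
  let rowLength : Int := (pvCeilSqrt cs.length : Int)
  -- string[i::rowLength]; inside the loop 0 < rowLength, so slice? is always some (the getD default is never used)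
  let parts : List (List Char) := (PySem.List.pyRange 0 rowLength).map
    (fun i => (PySem.List.slice? cs (some i) none rowLength).getD [])
  String.ofList (PySem.Chars.join [' '] parts)

-- ===== PRECONDITION & SPEC =====
def Spec_encryption (string : String) (out : String) : Prop := out = encryption_alt string
instance (string : String) (out : String) : Decidable (Spec_encryption string out) := by unfold Spec_encryption; infer_instance

-- ===== CLAIM (what is proved, stated in full; the proofs are below) =====
def Claim_equal_encryption : Prop := ∀ (string : String), Dom_encryption string → Spec_encryption string (encryption string)

-- ===== LEMMAS AND PROOFS =====

-- the grid as a pure function: rows of r consecutive characters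
def pvChunks (r : Nat) : List Char → List (List Char)
  | [] => []
  | c :: cs => (c :: cs.take (r - 1)) :: pvChunks r (cs.drop (r - 1))
termination_by cs => cs.length
decreasing_by simp

-- every r-th character, starting at the head
def pvStride (r : Nat) : List Char → List Char
  | [] => []
  | c :: cs => c :: pvStride r (cs.drop (r - 1))
termination_by cs => cs.length
decreasing_by simp

theorem pvAppendLast_append (pre : List (List Char)) (row : List Char) (c : Char) :
    pvAppendLast (pre ++ [row]) c = pre ++ [row ++ [c]] := by
  induction pre with
  | nil => rfl
  | cons x xs ih =>
    cases xs with
    | nil => simp [pvAppendLast]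
    | cons y ys => simpa [pvAppendLast] using ih

theorem pv_fold_row (r : Nat) (cs : List Char) :
    ∀ (s : Nat) (pre : List (List Char)) (row : List Char),
    (∀ k, k < cs.length → (s + k) % r ≠ 0) →
    (PySem.List.enumerate cs (s : Int)).foldl
      (fun m p => if PySem.Int.mod p.1 (r : Int) = 0 then m ++ [[p.2]] else pvAppendLast m p.2)
      (pre ++ [row]) = pre ++ [row ++ cs] := by
  induction cs with
  | nil => intro s pre row _; simp [PySem.List.enumerate]
  | cons c cs ih =>
    intro s pre row h
    rw [PySem.List.enumerate_cons]
    have h0 : s % r ≠ 0 := by have := h 0 (by simp); omega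
    have hmod : PySem.Int.mod (s : Int) (r : Int) ≠ 0 := by
      rw [PySem.Int.mod_natCast]
      exact_mod_cast h0
    simp only [List.foldl_cons, if_neg hmod, pvAppendLast_append]
    have : ((s : Int) + 1) = ((s + 1 : Nat) : Int) := by push_cast; ring
    rw [this, ih (s + 1) pre (row ++ [c]) (fun k hk => by
      rw [show s + 1 + k = s + (k + 1) from by omega]
      exact h (k + 1) (by simp; omega))]
    simp

theorem pv_fold_build (r : Nat) (hr : 0 < r) :
    ∀ (cs : List Char) (q : Nat) (pre : List (List Char)),
    (PySem.List.enumerate cs ((q * r : Nat) : Int)).foldl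
      (fun m p => if PySem.Int.mod p.1 (r : Int) = 0 then m ++ [[p.2]] else pvAppendLast m p.2)
      pre = pre ++ pvChunks r cs := by
  intro cs
  induction cs using pvChunks.induct r with
  | case1 => intro q pre; simp [PySem.List.enumerate, pvChunks]
  | case2 c cs ih =>
    intro q pre
    rw [PySem.List.enumerate_cons]
    have hmod : PySem.Int.mod ((q * r : Nat) : Int) (r : Int) = 0 := by
      rw [PySem.Int.mod_natCast]; simp [Nat.mul_mod_left]
    simp only [List.foldl_cons, if_pos hmod]
    have hsplit : cs = cs.take (r - 1) ++ cs.drop (r - 1) := (List.take_append_drop _ _).symm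
    conv_lhs => rw [hsplit]
    rw [PySem.List.enumerate_append, List.foldl_append]
    have hrow := pv_fold_row r (cs.take (r - 1)) (q * r + 1) pre [c] (fun k hk => by
      simp only [List.length_take] at hk
      have e1 : q * r + 1 + k = (1 + k) + q * r := by ring
      rw [e1, Nat.add_mul_mod_self_right, Nat.mod_eq_of_lt (by omega)]
      omega)
    rw [show ((q * r + 1 : Nat) : Int) = ((q * r : Nat) : Int) + 1 from by push_cast; ring] at hrow
    rw [hrow]
    by_cases hlen : r - 1 ≤ cs.length
    · have hnat : q * r + 1 + (cs.take (r - 1)).length = (q + 1) * r := by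
        have h2 : (q + 1) * r = q * r + r := by ring
        simp [List.length_take]; omega
      have hstart : ((q * r : Nat) : Int) + 1 + ((cs.take (r - 1)).length : Int)
          = (((q + 1) * r : Nat) : Int) := by exact_mod_cast hnat
      rw [hstart, ih (q + 1) (pre ++ [[c] ++ cs.take (r - 1)])]
      simp [pvChunks]
    · have hdrop : cs.drop (r - 1) = [] := List.drop_eq_nil_of_le (by omega)
      rw [hdrop]
      simp [PySem.List.enumerate, pvChunks, hdrop]

theorem pvStride_drop (r : Nat) (hr : 0 < r) (cs : List Char) (i : Nat) :
    pvStride r (cs.drop i) = if h : i < cs.length then cs[i] :: pvStride r (cs.drop (i + r)) else [] := by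
  split
  · next h =>
    rw [← List.getElem_cons_drop h]
    simp only [pvStride, List.drop_drop]
    rw [show i + 1 + (r - 1) = i + r from by omega]
  · next h =>
    rw [List.drop_eq_nil_of_le (by omega)]
    simp [pvStride]

theorem pv_col_chunks (r i : Nat) (hr : 0 < r) (hi : i < r) (cs : List Char) :
    ((pvChunks r cs).filter (fun j => decide ((i : Int) < (j.length : Int)))).map
      (fun j => PySem.List.pyGetD j (i : Int) ' ') = pvStride r (cs.drop i) := by
  induction cs using pvChunks.induct r with
  | case1 => simp [pvChunks, pvStride]
  | case2 c cs ih =>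
    have hrow : c :: cs.take (r - 1) = (c :: cs).take r := by
      cases r with
      | zero => omega
      | succ r' => simp [List.take_succ_cons]
    rw [pvChunks, hrow, pvStride_drop r hr (c :: cs) i]
    split
    · next hil =>
      have hL : i < ((c :: cs).take r).length := by
        simp only [List.length_take, List.length_cons]
        simp only [List.length_cons] at hil
        omega
      rw [List.filter_cons_of_pos (by simpa using (by exact_mod_cast hL : (i : Int) < (((c :: cs).take r).length : Int)))]
      simp only [List.map_cons]
      congr 1
      · rw [PySem.List.pyGetD_eq_getElem _ _ (by positivity) (by exact_mod_cast hL)]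
        simp [List.getElem_take]
      · rw [show i + r = (i + (r - 1)) + 1 from by omega, List.drop_succ_cons, ih,
          List.drop_drop, show r - 1 + i = i + (r - 1) from by omega]
    · next hil =>
      rw [List.filter_cons_of_neg (by
        simp only [decide_eq_true_eq, not_lt, List.length_take, List.length_cons]
        simp only [List.length_cons, not_lt] at hil
        exact_mod_cast (by omega : ((min r (cs.length + 1) : Nat) : Int) ≤ (i : Nat)))]
      rw [ih, List.drop_drop, List.drop_eq_nil_of_le (by
        simp only [List.length_cons, not_lt] at hil
        omega)]
      exact pvStride.eq_1 r

theorem pv_slice_core (r : Nat) (hr : 0 < r) (cs : List Char) : ∀ (i : Nat),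
    (List.range (if (i : Int) < (cs.length : Int) then (((cs.length : Int) - i + r - 1) / (r : Int)).toNat else 0)).filterMap
      (fun (k : Nat) => cs[((i : Int) + r * k).toNat]?) = pvStride r (cs.drop i) := by
  intro i
  induction hn : cs.length - i using Nat.strong_induction_on generalizing i with
  | _ n IH =>
    by_cases h : i < cs.length
    · have hif : ((i : Int) < (cs.length : Int)) := by exact_mod_cast h
      rw [if_pos hif]
      have hd1 : ((cs.length : Int) - i + r - 1) = (((cs.length - i + r - 1 : Nat) : Int)) := by
        omega
      have hdiv : (((cs.length : Int) - i + r - 1) / (r : Int)).toNat = (cs.length - i + r - 1) / r := by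
        rw [hd1, ← Int.natCast_div, Int.toNat_natCast]
      have hsucc : (cs.length - i + r - 1) / r = (cs.length - i - 1) / r + 1 := by
        rw [show cs.length - i + r - 1 = (cs.length - i - 1) + r from by omega, Nat.add_div_right _ hr]
      rw [hdiv, hsucc, List.range_succ_eq_map, List.filterMap_cons, List.filterMap_map]
      have hhead : cs[((i : Int) + r * ((0 : Nat) : Int)).toNat]? = some cs[i] := by
        simp [List.getElem?_eq_getElem h]
      rw [hhead]
      have hfun : ((fun (k : Nat) => cs[((i : Int) + r * k).toNat]?) ∘ Nat.succ)
          = fun (k : Nat) => cs[(((i + r : Nat) : Int) + (r : Int) * (k : Int)).toNat]? := by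
        funext k
        simp only [Function.comp]
        congr 2
        push_cast
        ring
      rw [hfun]
      have htail := IH (cs.length - (i + r)) (by omega) (i + r) rfl
      have hcnt : (if ((i + r : Nat) : Int) < (cs.length : Int)
          then (((cs.length : Int) - (i + r : Nat) + r - 1) / (r : Int)).toNat else 0)
          = (cs.length - i - 1) / r := by
        by_cases h2 : i + r < cs.length
        · rw [if_pos (by exact_mod_cast h2)]
          have : ((cs.length : Int) - (i + r : Nat) + r - 1) = (((cs.length - i - 1 : Nat) : Int)) := by
            push_cast; omega
          rw [this, ← Int.natCast_div, Int.toNat_natCast]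
        · rw [if_neg (by exact_mod_cast h2)]
          rw [Nat.div_eq_of_lt (by omega)]
      rw [hcnt] at htail
      rw [htail, pvStride_drop r hr cs i, dif_pos h]
    · rw [if_neg (by exact_mod_cast h)]
      rw [List.drop_eq_nil_of_le (by omega)]
      simp [pvStride]

theorem pv_slice_stride (r i : Nat) (hr : 0 < r) (cs : List Char) :
    PySem.List.slice? cs (some (i : Int)) none (r : Int) = some (pvStride r (cs.drop i)) := by
  rw [← pv_slice_core r hr cs i]
  have h0 : ¬((r : Int) = 0) := by omega
  have hrneg : ¬((r : Int) < 0) := by omega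
  have hrpos : (0 : Int) < (r : Int) := by omega
  have hineg : ¬((i : Int) < 0) := by omega
  simp only [PySem.List.slice?, PySem.List.sliceIndices, if_neg h0, if_neg hrneg, if_pos hrpos,
    if_neg hineg]
  by_cases hin : (i : Int) < (cs.length : Int)
  · rw [min_eq_left (le_of_lt hin), if_pos hin]
  · rw [min_eq_right (by omega), if_neg (lt_irrefl _), if_neg hin]
    simp

theorem pv_words_eq (cs : List Char) (r : Nat) :
    (PySem.List.pyRange 0 (r : Int)).foldl
      (fun acc i => acc ++ [((PySem.List.enumerate cs).foldl
          (fun m p => if PySem.Int.mod p.1 (r : Int) = 0 then m ++ [[p.2]] else pvAppendLast m p.2)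
          []).foldl
        (fun word j => if i < (j.length : Int) then word ++ [PySem.List.pyGetD j i ' '] else word)
        []]) []
    = (PySem.List.pyRange 0 (r : Int)).map
        (fun i => (PySem.List.slice? cs (some i) none (r : Int)).getD []) := by
  by_cases hr : 0 < r
  · rw [PySem.List.foldl_append_singleton_eq_map]
    simp only [List.nil_append]
    apply List.map_congr_left
    intro i hi
    obtain ⟨h0, h1⟩ := PySem.List.mem_pyRange_one.mp hi
    obtain ⟨k, rfl⟩ : ∃ k : Nat, i = (k : Int) := ⟨i.toNat, (Int.toNat_of_nonneg h0).symm⟩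
    have hk : k < r := by exact_mod_cast h1
    have hmat := pv_fold_build r hr cs 0 []
    rw [show ((0 * r : Nat) : Int) = (0 : Int) from by simp] at hmat
    rw [hmat]
    simp only [List.nil_append]
    have hcol := PySem.List.foldl_append_if (fun j => decide ((k : Int) < (j.length : Int)))
      (fun j => PySem.List.pyGetD j (k : Int) ' ') (pvChunks r cs) []
    simp only [decide_eq_true_eq, List.nil_append] at hcol
    rw [hcol, pv_col_chunks r k hr hk cs, pv_slice_stride r k hr cs]
    rfl
  · rw [show (r : Int) = 0 from by omega, PySem.List.pyRange_one_eq_nil (by omega)]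
    rfl

-- ===== VERDICT (by name: the statement is the Claim_ definition above) =====
theorem encryption_spec : Claim_equal_encryption := by
  intro string _
  show encryption string = encryption_alt string
  exact congrArg (fun l => String.ofList (PySem.Chars.join [' '] l))
    (pv_words_eq string.toList (pvCeilSqrt string.toList.length))
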